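-- pv_equiv track=rewrite | github.com/zacharyae/Scripture-Bot | utils/embed_helpers.py | calculate_items_per_page
-- ===== SOURCE A (Python) =====
-- MAX_EMBED_LENGTH = 1200
--
-- MAX_FIELD_LENGTH = 1024
--
-- def calculate_items_per_page(data):
--     items_per_page = 0
--     current_length = 0
--
--
--     for item in data:
--         verse = item['verse']
--         text = item['text']
--         formatted_item = f"{verse} - {text}\n\n"
--         item_length = len(formatted_item)
--
--         if current_length + item_length <= MAX_EMBED_LENGTH and item_length <= MAX_FIELD_LENGTH:
--             current_length += item_length
--             items_per_page += 1
--         else: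
--             break
--
--     return items_per_page
-- ===== SOURCE B (Python) =====
-- MAX_EMBED_LENGTH = 1200
--
-- MAX_FIELD_LENGTH = 1024
--
--
-- def calculate_items_per_page(data):
--     # Recursive descent over the item index carrying the remaining embed budget;
--     # the answer is the stopping index itself (no counter, no running total).
--     def count(i, budget):
--         if i >= len(data):
--             return i
--         item = data[i]
--         n = len(f"{item['verse']} - {item['text']}\n\n")
--         if n > budget or n > MAX_FIELD_LENGTH:
--             return i
--         return count(i + 1, budget - n)
--
--     return count(0, MAX_EMBED_LENGTH)
-- ===== Notes on version B (the rewrite author's own statement) =====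
-- stated objective: alternative
-- what changed: Replaced the accumulate-and-break for-loop (running total + item counter) by a recursive descent over the item index that carries the remaining embed budget downward and returns the stopping index itself; no counter and no running total are kept.
import Mathlib
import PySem

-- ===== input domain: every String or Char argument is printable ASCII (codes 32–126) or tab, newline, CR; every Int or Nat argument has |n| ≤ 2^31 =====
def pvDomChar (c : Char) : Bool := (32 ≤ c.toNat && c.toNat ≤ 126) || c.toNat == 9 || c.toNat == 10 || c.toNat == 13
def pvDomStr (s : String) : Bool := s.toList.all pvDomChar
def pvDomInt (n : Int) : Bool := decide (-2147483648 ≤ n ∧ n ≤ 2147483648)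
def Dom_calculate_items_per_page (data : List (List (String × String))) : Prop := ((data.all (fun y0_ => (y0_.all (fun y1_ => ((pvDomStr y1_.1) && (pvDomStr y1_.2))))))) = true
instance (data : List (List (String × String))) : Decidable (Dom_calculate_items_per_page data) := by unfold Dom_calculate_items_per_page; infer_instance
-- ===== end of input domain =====

-- B replaces A's accumulate-and-break loop (running total + counter) by a recursive descent
-- over the item index carrying the remaining embed budget; an alternative of the same cost.


-- ===== PORT A =====
-- dict lookup item[k]: first match in the association list (none = KeyError)
def pyLookup (d : List (String × String)) (k : String) : Option String :=
  (d.find? (fun p => p.1 == k)).map (·.2)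

-- the characters of f"{verse} - {text}\n\n" (exact: Python len counts code points = List Char length)
def fmtChars (verse text : String) : List Char :=
  verse.toList ++ [' ', '-', ' '] ++ text.toList ++ ['\n', '\n']

-- A's for-loop with break, as structural recursion over (current_length, items_per_page)
def goA : List (List (String × String)) → Int → Int → Int
  | [], _, cnt => cnt
  | item :: rest, curLen, cnt =>
    match pyLookup item "verse", pyLookup item "text" with
    | some verse, some text =>
      let itemLength : Int := ((fmtChars verse text).length : Int)
      if curLen + itemLength ≤ 1200 ∧ itemLength ≤ 1024 then
        goA rest (curLen + itemLength) (cnt + 1)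
      else cnt
    | _, _ => cnt  -- Python raises KeyError here; excluded by Pre_

def calculate_items_per_page (data : List (List (String × String))) : Int :=
  goA data 0 0

-- ===== PORT B =====
-- B's inner `count(i, budget)`: recursion over the index with the remaining budget
def goB (data : List (List (String × String))) (i : Nat) (budget : Int) : Int :=
  if h : i < data.length then
    match pyLookup data[i] "verse", pyLookup data[i] "text" with
    | some verse, some text =>
      let n : Int := ((fmtChars verse text).length : Int)
      if n > budget ∨ n > 1024 then (i : Int)
      else goB data (i + 1) (budget - n)
    | _, _ => (i : Int)  -- Python raises KeyError here; excluded by Pre_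
  else (i : Int)
termination_by data.length - i

def calculate_items_per_page_alt (data : List (List (String × String))) : Int :=
  goB data 0 1200

-- ===== PRECONDITION & SPEC =====
def hasKeys (item : List (String × String)) : Bool :=
  (pyLookup item "verse").isSome && (pyLookup item "text").isSome

-- Pre_ excludes exactly the inputs where both Pythons raise KeyError: some item lacks key
-- 'verse' or 'text' AND no earlier item already stops the scan (an over-long field or a
-- cumulative total beyond the embed limit), so the scan actually reaches the key-less item.
def Pre_calculate_items_per_page (data : List (List (String × String))) : Prop :=
  let k := data.findIdx (fun item => !hasKeys item)
  let lens : List Int := (data.take k).map (fun item =>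
    match pyLookup item "verse", pyLookup item "text" with
    | some verse, some text => ((fmtChars verse text).length : Int)
    | _, _ => 0)
  k = data.length ∨
    ((List.range k).any (fun i =>
      decide (1024 < lens.getD i 0) || decide (1200 < (lens.take (i + 1)).sum))) = true
instance (data : List (List (String × String))) : Decidable (Pre_calculate_items_per_page data) := by unfold Pre_calculate_items_per_page; infer_instance

def pvWitness_calculate_items_per_page : (List (List (String × String))) :=
  [[("verse", "John 3:16"), ("text", "For God so loved the world")],
   [("verse", "Gen 1:1"), ("text", "In the beginning")]]

def Spec_calculate_items_per_page (data : List (List (String × String))) (out : Int) : Prop := out = calculate_items_per_page_alt data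
instance (data : List (List (String × String))) (out : Int) : Decidable (Spec_calculate_items_per_page data out) := by unfold Spec_calculate_items_per_page; infer_instance

-- ===== CLAIM (what is proved, stated in full; the proofs are below) =====
def Claim_equal_calculate_items_per_page : Prop := ∀ (data : List (List (String × String))), Dom_calculate_items_per_page data → Pre_calculate_items_per_page data → Spec_calculate_items_per_page data (calculate_items_per_page data)

-- ===== LEMMAS AND PROOFS =====

-- Bridge: goB from index i with budget b equals goA on the remaining suffix with
-- current_length 1200 - b and counter i (A's counter always equals the current index,
-- and A's `current_length + n ≤ 1200` is B's `n ≤ budget`). Holds for every input,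
-- including the KeyError branches, which both sides answer with the current index/count.
lemma goB_eq_goA (rest : List (List (String × String)))
    (data : List (List (String × String))) (i : Nat) (b : Int)
    (hdrop : data.drop i = rest) (hle : i ≤ data.length) :
    goB data i b = goA rest (1200 - b) (i : Int) := by
  induction rest generalizing i b with
  | nil =>
    have hlen : data.length ≤ i := by
      have := congrArg List.length hdrop
      simp at this
      omega
    rw [goB]
    simp [Nat.not_lt.mpr hlen, goA]
  | cons item rs ih =>
    have hi : i < data.length := by
      have := congrArg List.length hdrop
      simp at this
      omega
    have hget : data[i] = item := by
      have h0 : (data.drop i)[0]'(by rw [hdrop]; simp) = item := by simp [hdrop]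
      simpa [List.getElem_drop] using h0
    have hdrop' : data.drop (i + 1) = rs := by
      rw [← List.drop_drop, hdrop, List.drop_one, List.tail_cons]
    rw [goB]
    simp only [hi, dite_true, hget]
    cases hv : pyLookup item "verse" with
    | none => simp [goA, hv]
    | some verse =>
      cases ht : pyLookup item "text" with
      | none => simp [goA, hv, ht]
      | some text =>
        simp only [goA, hv, ht]
        by_cases hc : ((fmtChars verse text).length : Int) > b ∨ ((fmtChars verse text).length : Int) > 1024
        · rw [if_pos hc, if_neg (by omega)]
        · rw [if_neg hc, if_pos (by omega)]
          rw [ih (i + 1) (b - ((fmtChars verse text).length : Int)) hdrop' (by omega)]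
          push_cast
          ring_nf

-- ===== VERDICT (by name: the statement is the Claim_ definition above) =====
theorem calculate_items_per_page_spec : Claim_equal_calculate_items_per_page := by
  intro data _hdom _hpre
  show calculate_items_per_page data = calculate_items_per_page_alt data
  unfold calculate_items_per_page calculate_items_per_page_alt
  rw [goB_eq_goA data data 0 1200 (by simp) (by omega)]
  norm_num
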